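-- pv_equiv track=rewrite | github.com/tdi/pypm | footprint.py | _parallels
-- ===== SOURCE A (Python) =====
-- def _parallels(seen, df):
--     par = []
--     for event in seen:
--         for event2 in seen:
--             if (event, event2) not in par:
--                 if (event, event2) in df and (event2,event) in df:
--                     par.append((event, event2))
--     return par
-- ===== SOURCE B (Python) =====
-- def _parallels(seen, df):
--     # df-driven: collect the symmetric pairs from df once, then sort them into
--     # A's output order (lexicographic by first-occurrence rank of each event).
--     uniq = list(dict.fromkeys(seen))
--     n = len(uniq)
--     dfset = set(df)
--     sym = {p for p in df if (p[1], p[0]) in dfset and p[0] in uniq and p[1] in uniq}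
--     # scalar rank i*n+j encodes the lexicographic order of the index pair (i, j)
--     return sorted(sym, key=lambda p: uniq.index(p[0]) * n + uniq.index(p[1]))
-- ===== Notes on version B (the rewrite author's own statement) =====
-- stated objective: faster
-- what changed: B is df-driven instead of seen-x-seen-driven: one pass over df collects the symmetric pairs whose events occur in seen into a set, which is then sorted by the first-occurrence rank of the event pair, replacing A's nested loop over seen with its growing-list membership guard and per-candidate linear df scans.
import Mathlib
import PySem

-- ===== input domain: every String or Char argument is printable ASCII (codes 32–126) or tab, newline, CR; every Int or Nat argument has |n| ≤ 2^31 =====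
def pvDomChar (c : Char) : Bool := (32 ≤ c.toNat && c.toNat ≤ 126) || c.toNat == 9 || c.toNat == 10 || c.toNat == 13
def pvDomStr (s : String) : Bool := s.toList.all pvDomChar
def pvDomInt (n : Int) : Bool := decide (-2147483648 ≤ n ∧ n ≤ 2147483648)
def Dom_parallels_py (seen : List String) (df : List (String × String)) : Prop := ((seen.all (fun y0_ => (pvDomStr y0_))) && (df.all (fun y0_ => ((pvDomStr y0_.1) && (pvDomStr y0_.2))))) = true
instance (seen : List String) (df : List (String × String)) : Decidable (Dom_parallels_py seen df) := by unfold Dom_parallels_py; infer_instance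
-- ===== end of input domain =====

-- B is df-driven instead of seen×seen-driven: it collects the symmetric pairs by one pass over df
-- and sorts them into A's order (lexicographic by first-occurrence rank); return values proved equal.

-- ===== PORT A =====
def parallels_py (seen : List String) (df : List (String × String)) : List (String × String) :=
  seen.foldl (fun par event =>
    seen.foldl (fun par event2 =>
      if (event, event2) ∉ par then
        if (event, event2) ∈ df ∧ (event2, event) ∈ df then par ++ [(event, event2)]
        else par
      else par) par) []

-- ===== PORT B =====
-- Python's `uniq.index(...)` is applied only to members of `sym`, whose components are all in
-- `uniq`, so `index?` is always `some` there; `.getD 0` never fires and the port is exact.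
def parallels_py_alt (seen : List String) (df : List (String × String)) : List (String × String) :=
  let uniq := PySem.List.dedup seen
  let n := uniq.length
  let dfset := PySem.Set.ofList df
  let sym := PySem.Set.ofList (df.filter (fun p =>
    PySem.Set.contains dfset (p.2, p.1) && decide (p.1 ∈ uniq) && decide (p.2 ∈ uniq)))
  PySem.List.sorted sym
    (fun p => (PySem.List.index? uniq p.1).getD 0 * n + (PySem.List.index? uniq p.2).getD 0) false

-- ===== PRECONDITION & SPEC =====
def Spec_parallels_py (seen : List String) (df : List (String × String)) (out : List (String × String)) : Prop := out = parallels_py_alt seen df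
instance (seen : List String) (df : List (String × String)) (out : List (String × String)) : Decidable (Spec_parallels_py seen df out) := by unfold Spec_parallels_py; infer_instance

-- ===== CLAIM (what is proved, stated in full; the proofs are below) =====
def Claim_equal_parallels_py : Prop := ∀ (seen : List String) (df : List (String × String)), Dom_parallels_py seen df → Spec_parallels_py seen df (parallels_py seen df)

-- ===== LEMMAS AND PROOFS =====

-- the block of output pairs contributed by one (fresh) outer event e of A's loop
def pvBlock (df : List (String × String)) (u : List String) (e : String) : List (String × String) :=
  (u.filter (fun x => decide ((e, x) ∈ df ∧ (x, e) ∈ df))).map (fun x => (e, x))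

-- the first-occurrence rank key B sorts by
def pvRank (u : List String) (p : String × String) : Nat :=
  (PySem.List.index? u p.1).getD 0 * u.length + (PySem.List.index? u p.2).getD 0

-- first-occurrence dedup of l relative to an already-seen set v (A-side bookkeeping)
def pvNE (v : List String) : List String → List String
  | [] => []
  | x :: xs => if x ∈ v then pvNE v xs else x :: pvNE (x :: v) xs

lemma pv_NE_congr (l : List String) : ∀ (v w : List String), (∀ a, a ∈ v ↔ a ∈ w) → pvNE v l = pvNE w l := by
  induction l with
  | nil => intro v w _; rfl
  | cons x xs ih =>
    intro v w h
    simp only [pvNE]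
    by_cases hx : x ∈ v
    · rw [if_pos hx, if_pos ((h x).mp hx)]; exact ih v w h
    · rw [if_neg hx, if_neg (fun hw => hx ((h x).mpr hw))]
      congr 1
      exact ih (x :: v) (x :: w) (by intro a; simp [h a])

lemma pv_append_NE (l : List String) : ∀ (v : List String), v ++ pvNE v l = PySem.Set.update v l := by
  induction l with
  | nil => intro v; simp [pvNE, PySem.Set.update]
  | cons x xs ih =>
    intro v
    rw [PySem.Set.update_cons]
    by_cases hx : x ∈ v
    · rw [PySem.Set.add_of_mem hx, ← ih v]
      simp [pvNE, hx]
    · rw [PySem.Set.add_of_not_mem hx, ← ih (v ++ [x])]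
      simp only [pvNE, if_neg hx]
      rw [pv_NE_congr xs (x :: v) (v ++ [x]) (by intro a; simp [or_comm])]
      simp

lemma pv_NE_nil (l : List String) : pvNE [] l = PySem.List.dedup l := by
  have h := pv_append_NE l []
  simpa [PySem.Set.update_nil_left] using h

lemma pv_NE_of_subset (l : List String) : ∀ (v : List String), (∀ x ∈ l, x ∈ v) → pvNE v l = [] := by
  induction l with
  | nil => intro v _; rfl
  | cons x xs ih =>
    intro v h
    simp only [pvNE, if_pos (h x (by simp))]
    exact ih v (fun y hy => h y (by simp [hy]))

lemma pv_inner (df : List (String × String)) (e : String) (l : List String) :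
    ∀ (v : List String) (par : List (String × String)),
    (∀ x : String, (e, x) ∈ par ↔ (x ∈ v ∧ (e, x) ∈ df ∧ (x, e) ∈ df)) →
    l.foldl (fun par e2 =>
      if (e, e2) ∉ par then
        if (e, e2) ∈ df ∧ (e2, e) ∈ df then par ++ [(e, e2)] else par
      else par) par
    = par ++ ((pvNE v l).filter (fun x => decide ((e, x) ∈ df ∧ (x, e) ∈ df))).map (fun x => (e, x)) := by
  induction l with
  | nil => intro v par _; simp [pvNE]
  | cons x xs ih =>
    intro v par h
    simp only [List.foldl_cons]
    by_cases hp : (e, x) ∈ df ∧ (x, e) ∈ df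
    · by_cases hx : x ∈ v
      · -- already seen: (e,x) ∈ par, skipped
        have hm : (e, x) ∈ par := (h x).mpr ⟨hx, hp⟩
        rw [if_neg (by simpa using hm)]
        simp only [pvNE, if_pos hx]
        exact ih v par h
      · -- fresh and symmetric: appended
        have hm : (e, x) ∉ par := fun hc => hx ((h x).mp hc).1
        rw [if_pos (by simpa using hm), if_pos hp]
        have h' : ∀ y : String, (e, y) ∈ par ++ [(e, x)] ↔ (y ∈ x :: v ∧ (e, y) ∈ df ∧ (y, e) ∈ df) := by
          intro y
          by_cases hyx : y = x
          · subst hyx; simp [hp]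
          · simp [h y, hyx, Prod.ext_iff]
        rw [ih (x :: v) (par ++ [(e, x)]) h']
        simp [pvNE, if_neg hx, hp, List.append_assoc]
    · -- not a symmetric pair: never appended
      have hm : (e, x) ∉ par := fun hc => hp ((h x).mp hc).2
      rw [if_pos (by simpa using hm), if_neg hp]
      by_cases hx : x ∈ v
      · simp only [pvNE, if_pos hx]
        exact ih v par h
      · have h' : ∀ y : String, (e, y) ∈ par ↔ (y ∈ x :: v ∧ (e, y) ∈ df ∧ (y, e) ∈ df) := by
          intro y
          by_cases hyx : y = x
          · subst hyx; simp [hp, hm]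
          · simp [h y, hyx]
        rw [ih (x :: v) par h']
        simp [pvNE, if_neg hx, hp]

lemma pv_mem_flat (df : List (String × String)) (u : List String) (w : List String) (e x : String) :
    (e, x) ∈ w.flatMap (pvBlock df u) ↔
      e ∈ w ∧ x ∈ u ∧ ((e, x) ∈ df ∧ (x, e) ∈ df) := by
  simp only [pvBlock, List.mem_flatMap, List.mem_map, List.mem_filter,
    decide_eq_true_eq, Prod.mk.injEq]
  constructor
  · rintro ⟨a, ha, e2, ⟨h2, hc⟩, h1, h2'⟩
    subst h1; subst h2'
    exact ⟨ha, h2, hc⟩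
  · rintro ⟨he, hx, hp⟩
    exact ⟨e, he, x, ⟨hx, hp⟩, rfl, rfl⟩

lemma pv_outer (df : List (String × String)) (seen : List String) (l : List String) :
    ∀ (w : List String),
    l.foldl (fun par e =>
        seen.foldl (fun par e2 =>
          if (e, e2) ∉ par then
            if (e, e2) ∈ df ∧ (e2, e) ∈ df then par ++ [(e, e2)] else par
          else par) par)
      (w.flatMap (pvBlock df (PySem.List.dedup seen)))
    = (PySem.Set.update w l).flatMap (pvBlock df (PySem.List.dedup seen)) := by
  induction l with
  | nil => intro w; simp [PySem.Set.update]
  | cons e l ih =>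
    intro w
    simp only [List.foldl_cons, PySem.Set.update_cons]
    by_cases he : e ∈ w
    · -- duplicate outer event: the inner loop adds nothing
      have h : ∀ x : String, (e, x) ∈ w.flatMap (pvBlock df (PySem.List.dedup seen)) ↔
          (x ∈ PySem.List.dedup seen ∧ (e, x) ∈ df ∧ (x, e) ∈ df) := by
        intro x; rw [pv_mem_flat]; simp [he]
      rw [pv_inner df e seen (PySem.List.dedup seen) _ h,
          pv_NE_of_subset seen (PySem.List.dedup seen)
            (fun x hx => by simpa [PySem.List.mem_dedup] using hx)]
      simp only [List.filter_nil, List.map_nil, List.append_nil]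
      rw [PySem.Set.add_of_mem he]
      exact ih w
    · -- fresh outer event: the inner loop appends exactly its block
      have h : ∀ x : String, (e, x) ∈ w.flatMap (pvBlock df (PySem.List.dedup seen)) ↔
          (x ∈ ([] : List String) ∧ (e, x) ∈ df ∧ (x, e) ∈ df) := by
        intro x; rw [pv_mem_flat]; simp [he]
      rw [pv_inner df e seen [] _ h, pv_NE_nil, PySem.Set.add_of_not_mem he]
      have hb : List.map (fun x => (e, x))
            (List.filter (fun x => decide ((e, x) ∈ df ∧ (x, e) ∈ df)) (PySem.List.dedup seen))
          = pvBlock df (PySem.List.dedup seen) e := rfl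
      have hfm : List.flatMap (pvBlock df (PySem.List.dedup seen)) w ++ pvBlock df (PySem.List.dedup seen) e
          = (w ++ [e]).flatMap (pvBlock df (PySem.List.dedup seen)) := by
        simp
      rw [hb, hfm]
      exact ih (w ++ [e])

-- A's result in closed form
lemma pv_A_eq (seen : List String) (df : List (String × String)) :
    parallels_py seen df = (PySem.List.dedup seen).flatMap (pvBlock df (PySem.List.dedup seen)) := by
  unfold parallels_py
  have h := pv_outer df seen seen []
  simp only [List.flatMap_nil] at h
  rw [h, PySem.Set.update_nil_left, PySem.List.dedup_eq_ofList]

-- index? of the i-th element of a Nodup list is i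
lemma pv_index?_getElem (u : List String) (hnd : u.Nodup) (i : Nat) (hi : i < u.length) :
    PySem.List.index? u u[i] = some i := by
  rw [PySem.List.index?_eq_some_iff]
  refine ⟨u.take i, u.drop (i + 1), ?_, ?_, ?_⟩
  · conv_lhs => rw [← List.take_append_drop i u]
    rw [List.drop_eq_getElem_cons hi]
  · simp [List.length_take]; omega
  · intro hmem
    rw [List.mem_take_iff_getElem] at hmem
    obtain ⟨j, hj, hje⟩ := hmem
    have hji : j < i := lt_of_lt_of_le hj (min_le_left _ _)
    have hjl : j < u.length := lt_of_lt_of_le hj (min_le_right _ _)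
    exact absurd (List.Nodup.getElem_inj_iff hnd |>.mp hje) (by omega)

lemma pv_idx_lt (u : List String) (y : String) (hy : y ∈ u) :
    (PySem.List.index? u y).getD 0 < u.length := by
  obtain ⟨k, hk⟩ : ∃ k, PySem.List.index? u y = some k := by
    rw [PySem.List.index?_eq_idxOf?]
    exact Option.isSome_iff_exists.mp (List.isSome_idxOf?.mpr hy)
  obtain ⟨hlt, -, -⟩ := PySem.List.getElem_of_index?_eq_some hk
  rw [hk]
  simpa using hlt

-- a Nodup list is strictly increasing under its own first-index key
lemma pv_u_pairwise (u : List String) (hnd : u.Nodup) :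
    u.Pairwise (fun a b => (PySem.List.index? u a).getD 0 < (PySem.List.index? u b).getD 0) := by
  rw [List.pairwise_iff_getElem]
  intro i j hi hj hij
  rw [pv_index?_getElem u hnd i hi, pv_index?_getElem u hnd j hj]
  simpa using hij

-- Pairwise through flatMap: blocks internally sorted, blocks pairwise dominated
lemma pv_pairwise_flatMap {α β : Type} {R : β → β → Prop} (g : α → List β) :
    ∀ (l : List α), l.Pairwise (fun a b => ∀ x ∈ g a, ∀ y ∈ g b, R x y) →
    (∀ a ∈ l, (g a).Pairwise R) → (l.flatMap g).Pairwise R := by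
  intro l
  induction l with
  | nil => intro _ _; simp
  | cons a l ih =>
    intro hp hblk
    rw [List.pairwise_cons] at hp
    rw [List.flatMap_cons, List.pairwise_append]
    refine ⟨hblk a (by simp), ih hp.2 (fun b hb => hblk b (by simp [hb])), ?_⟩
    intro x hx y hy
    rw [List.mem_flatMap] at hy
    obtain ⟨b, hb, hyb⟩ := hy
    exact hp.1 b hb x hx y hyb

-- A's result is strictly increasing under B's rank key
lemma pv_ys_pairwise (df : List (String × String)) (u : List String) (hnd : u.Nodup) :
    (u.flatMap (pvBlock df u)).Pairwise (fun p q => pvRank u p < pvRank u q) := by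
  apply pv_pairwise_flatMap
  · -- across blocks: the first component's rank strictly grows
    refine (pv_u_pairwise u hnd).imp ?_
    intro a b hab x hx y hy
    simp only [pvBlock, List.mem_map, List.mem_filter] at hx hy
    obtain ⟨x2, ⟨hx2u, -⟩, hxe⟩ := hx
    obtain ⟨y2, ⟨hy2u, -⟩, hye⟩ := hy
    subst hxe; subst hye
    simp only [pvRank]
    have h1 : (PySem.List.index? u x2).getD 0 < u.length := pv_idx_lt u x2 hx2u
    calc (PySem.List.index? u a).getD 0 * u.length + (PySem.List.index? u x2).getD 0
        < ((PySem.List.index? u a).getD 0 + 1) * u.length := by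
          rw [Nat.succ_mul]; omega
      _ ≤ (PySem.List.index? u b).getD 0 * u.length := Nat.mul_le_mul_right _ hab
      _ ≤ _ := Nat.le_add_right _ _
  · -- within a block: the second component's rank strictly grows
    intro a _
    unfold pvBlock
    rw [List.pairwise_map]
    refine ((pv_u_pairwise u hnd).sublist List.filter_sublist).imp ?_
    intro x y hxy
    simp only [pvRank]
    omega

lemma pv_mem_sym (df : List (String × String)) (u : List String) (p : String × String) :
    p ∈ PySem.Set.ofList (df.filter (fun p =>
        PySem.Set.contains (PySem.Set.ofList df) (p.2, p.1) && decide (p.1 ∈ u) && decide (p.2 ∈ u)))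
      ↔ (p ∈ df ∧ (p.2, p.1) ∈ df ∧ p.1 ∈ u ∧ p.2 ∈ u) := by
  rw [PySem.Set.mem_ofList, List.mem_filter]
  simp [pysem, and_assoc]

-- ===== VERDICT (by name: the statement is the Claim_ definition above) =====
theorem parallels_py_spec : Claim_equal_parallels_py := by
  intro seen df _
  show parallels_py seen df = parallels_py_alt seen df
  rw [pv_A_eq]
  show _ = PySem.List.sorted
      (PySem.Set.ofList (df.filter (fun p =>
        PySem.Set.contains (PySem.Set.ofList df) (p.2, p.1)
          && decide (p.1 ∈ PySem.List.dedup seen) && decide (p.2 ∈ PySem.List.dedup seen))))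
      (pvRank (PySem.List.dedup seen)) false
  have hnd := PySem.List.nodup_dedup seen
  have hpw := pv_ys_pairwise df (PySem.List.dedup seen) hnd
  have hysnd : ((PySem.List.dedup seen).flatMap (pvBlock df (PySem.List.dedup seen))).Nodup :=
    hpw.imp (fun h => by rintro rfl; exact lt_irrefl _ h)
  refine (PySem.List.sorted_eq_of_perm_of_pairwise_lt _ _ _ ?_ hpw).symm
  rw [List.perm_ext_iff_of_nodup hysnd (PySem.Set.nodup_ofList _)]
  rintro ⟨e, x⟩
  rw [pv_mem_flat, pv_mem_sym]
  tauto
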